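-- pv_equiv track=rewrite | github.com/AvaTar-ArTs/AVATARARTS | 00_ACTIVE/CLIENT_PROJECTS/Dr_Adu_GainesvillePFS_SEO_Project/01_Project_Files/file_analyzer_set_112_copy_603.py | analyze_markdown_structure
-- ===== SOURCE A (Python) =====
-- def analyze_markdown_structure(content):
--     """Analyze Markdown structure"""
--     lines = content.split('\n')
--     return {
--         'headers': len([line for line in lines if line.startswith('#')]),
--         'code_blocks': len([line for line in lines if line.startswith('```')]),
--         'lists': len([line for line in lines if line.startswith('-') or line.startswith('*')]),
--         'tables': len([line for line in lines if '|' in line])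
--     }
-- ===== SOURCE B (Python) =====
-- def analyze_markdown_structure(content):
--     """Analyze Markdown structure (character-level state machine, no split)"""
--     counts = {'headers': 0, 'code_blocks': 0, 'lists': 0, 'tables': 0}
--     n = 0          # chars seen in current line, capped at 3
--     ticks = 0      # leading backtick run of current line, capped at 3
--     is_header = is_list = has_pipe = False
--     for ch in content:
--         if ch == '\n':
--             counts['headers'] += is_header
--             counts['code_blocks'] += ticks == 3
--             counts['lists'] += is_list
--             counts['tables'] += has_pipe
--             n = 0
--             ticks = 0
--             is_header = is_list = has_pipe = False
--         else:
--             if n == 0: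
--                 is_header = ch == '#'
--                 is_list = ch == '-' or ch == '*'
--             if ticks == n and ch == '`' and n < 3:
--                 ticks += 1
--             if n < 3:
--                 n += 1
--             if ch == '|':
--                 has_pipe = True
--     counts['headers'] += is_header
--     counts['code_blocks'] += ticks == 3
--     counts['lists'] += is_list
--     counts['tables'] += has_pipe
--     return counts
-- ===== Notes on version B (the rewrite author's own statement) =====
-- stated objective: alternative
-- what changed: Replaces the newline-split plus four list-comprehension scans with a single character-level state machine over the raw string: no line list is ever built; per-line flags (first char, capped leading-backtick run, pipe-seen) are maintained and flushed into four counters at each newline and at the end.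
import Mathlib
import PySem

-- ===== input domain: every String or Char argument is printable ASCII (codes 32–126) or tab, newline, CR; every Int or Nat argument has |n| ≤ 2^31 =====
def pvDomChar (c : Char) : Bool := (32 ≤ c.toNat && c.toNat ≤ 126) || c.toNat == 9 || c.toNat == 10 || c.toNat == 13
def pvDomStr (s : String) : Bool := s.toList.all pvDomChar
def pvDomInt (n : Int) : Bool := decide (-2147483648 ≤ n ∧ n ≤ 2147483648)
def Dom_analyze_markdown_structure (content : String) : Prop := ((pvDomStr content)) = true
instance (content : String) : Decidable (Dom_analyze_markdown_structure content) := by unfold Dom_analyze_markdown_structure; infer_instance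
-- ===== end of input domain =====

-- B replaces A's split('\n') plus four list-comprehension scans with a single
-- character-level state machine over the raw string (no line list is built).

-- ===== PORT A =====
def analyze_markdown_structure (content : String) : List (String × Int) :=
  let lines := PySem.Chars.splitOn content.toList ['\n']
  [ ("headers", ((lines.filter (fun line => PySem.Chars.startswith line ['#'])).length : Int)),
    ("code_blocks", ((lines.filter (fun line => PySem.Chars.startswith line ['`','`','`'])).length : Int)),
    ("lists", ((lines.filter (fun line => PySem.Chars.startswith line ['-'] || PySem.Chars.startswith line ['*'])).length : Int)),
    ("tables", ((lines.filter (fun line => PySem.Chars.isIn ['|'] line)).length : Int)) ]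

-- ===== PORT B =====
-- loop state of Source B: four counters + per-line flags (n, ticks capped at 3; first-char and pipe flags)
structure MdState where
  h : Int
  c : Int
  l : Int
  t : Int
  n : Nat
  ticks : Nat
  isH : Bool
  isL : Bool
  pipe : Bool
deriving Repr, DecidableEq

def mdInit : MdState := ⟨0, 0, 0, 0, 0, 0, false, false, false⟩

-- one iteration of Source B's `for ch in content` loop
def mdStep (s : MdState) (ch : Char) : MdState :=
  if ch = '\n' then
    { h := s.h + (if s.isH then 1 else 0),
      c := s.c + (if s.ticks = 3 then 1 else 0),
      l := s.l + (if s.isL then 1 else 0),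
      t := s.t + (if s.pipe then 1 else 0),
      n := 0, ticks := 0, isH := false, isL := false, pipe := false }
  else
    { h := s.h, c := s.c, l := s.l, t := s.t,
      isH := if s.n = 0 then decide (ch = '#') else s.isH,
      isL := if s.n = 0 then (decide (ch = '-') || decide (ch = '*')) else s.isL,
      ticks := if s.ticks = s.n ∧ ch = '`' ∧ s.n < 3 then s.ticks + 1 else s.ticks,
      n := if s.n < 3 then s.n + 1 else s.n,
      pipe := s.pipe || decide (ch = '|') }

-- the final flush of the (always present) last line, then build the dict
def mdFinish (s : MdState) : List (String × Int) :=
  [ ("headers", s.h + (if s.isH then 1 else 0)),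
    ("code_blocks", s.c + (if s.ticks = 3 then 1 else 0)),
    ("lists", s.l + (if s.isL then 1 else 0)),
    ("tables", s.t + (if s.pipe then 1 else 0)) ]

def analyze_markdown_structure_alt (content : String) : List (String × Int) :=
  mdFinish (content.toList.foldl mdStep mdInit)

-- ===== PRECONDITION & SPEC =====
def Spec_analyze_markdown_structure (content : String) (out : List (String × Int)) : Prop := out = analyze_markdown_structure_alt content
instance (content : String) (out : List (String × Int)) : Decidable (Spec_analyze_markdown_structure content out) := by unfold Spec_analyze_markdown_structure; infer_instance

-- ===== CLAIM (what is proved, stated in full; the proofs are below) =====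
def Claim_equal_analyze_markdown_structure : Prop := ∀ (content : String), Dom_analyze_markdown_structure content → Spec_analyze_markdown_structure content (analyze_markdown_structure content)

-- ===== LEMMAS AND PROOFS =====

-- simple recursive characterization of split('\n'): cur is the reversed current line
def pvLinesAux : List Char → List Char → List (List Char)
  | cur, [] => [cur.reverse]
  | cur, c :: rest => if c = '\n' then cur.reverse :: pvLinesAux [] rest else pvLinesAux (c :: cur) rest

theorem pvSplitOn_go_eq (fuel : Nat) : ∀ (l cur : List Char) (acc : List (List Char)),
    l.length < fuel →
    PySem.Chars.splitOn.go ['\n'] fuel l cur acc = acc.reverse ++ pvLinesAux cur l := by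
  induction fuel with
  | zero => intro l cur acc h; omega
  | succ fuel ih =>
    intro l cur acc h
    cases l with
    | nil => simp [PySem.Chars.splitOn.go, pvLinesAux]
    | cons c rest =>
      rw [PySem.Chars.splitOn.go]
      by_cases hc : c = '\n'
      · subst hc
        simp only [List.isPrefixOf, beq_self_eq_true, Bool.true_and, if_pos, List.length_cons,
          List.length_nil, List.drop_succ_cons, List.drop_zero]
        rw [ih rest [] (cur.reverse :: acc) (by simpa using Nat.lt_of_succ_lt_succ h)]
        simp [pvLinesAux]
      · have hpre : (['\n'].isPrefixOf (c :: rest)) = false := by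
          simp [List.isPrefixOf, Ne.symm hc]
        simp only [hpre, Bool.false_eq_true, if_neg]
        rw [ih rest (c :: cur) acc (by simpa using Nat.lt_of_succ_lt_succ h)]
        simp [pvLinesAux, hc]

theorem pvSplitOn_eq (cs : List Char) :
    PySem.Chars.splitOn cs ['\n'] = pvLinesAux [] cs := by
  rw [PySem.Chars.splitOn, pvSplitOn_go_eq (cs.length + 1) cs [] [] (by omega)]
  simp

-- length of the leading backtick run of a line
def pvTick (p : List Char) : Nat := (p.takeWhile (fun c => c = '`')).length

theorem pvTickLe (q : List Char) : pvTick q ≤ q.length :=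
  List.Sublist.length_le (List.takeWhile_sublist _)

theorem pvTickCons (a : Char) (q : List Char) :
    pvTick (a :: q) = if a = '`' then pvTick q + 1 else 0 := by
  simp only [pvTick, List.takeWhile_cons]
  by_cases h : a = '`' <;> simp [h]

theorem pvTickAppend (p : List Char) (c : Char) :
    pvTick (p ++ [c]) = if pvTick p = p.length ∧ c = '`' then p.length + 1 else pvTick p := by
  induction p with
  | nil =>
    by_cases h : c = '`' <;> simp [pvTick, h]
  | cons a q ih =>
    have hle := pvTickLe q
    simp only [List.cons_append, pvTickCons, ih, List.length_cons]
    by_cases ha : a = '`' <;> by_cases hc : c = '`' <;> by_cases hq : pvTick q = q.length <;>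
      simp [ha, hc, hq] <;> omega

theorem pvStartHash (p : List Char) (c : Char) (x : Char) :
    PySem.Chars.startswith (p ++ [c]) [x] =
      if p.length = 0 then decide (c = x) else PySem.Chars.startswith p [x] := by
  cases p with
  | nil =>
    apply Bool.eq_iff_iff.mpr
    by_cases h : c = x <;> simp [PySem.Chars.startswith_iff, List.cons_prefix_cons, h] <;>
      simp [Ne.symm h]
  | cons d q =>
    apply Bool.eq_iff_iff.mpr
    simp [PySem.Chars.startswith_iff, List.cons_prefix_cons]

theorem pvPipeAppend (p : List Char) (c : Char) :
    PySem.Chars.isIn ['|'] (p ++ [c]) = (PySem.Chars.isIn ['|'] p || decide (c = '|')) := by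
  apply Bool.eq_iff_iff.mpr
  simp only [PySem.Chars.isIn_iff_infix, List.singleton_infix_iff, List.mem_append,
    List.mem_singleton, Bool.or_eq_true, decide_eq_true_eq]
  exact or_congr Iff.rfl eq_comm

theorem pvTick3 (p : List Char) :
    (min (pvTick p) 3 = 3) ↔ PySem.Chars.startswith p ['`','`','`'] = true := by
  rw [PySem.Chars.startswith_iff]
  match p with
  | [] => simp [pvTick]
  | [a] =>
    by_cases ha : a = '`' <;> simp [pvTick, List.cons_prefix_cons, ha]
  | [a, b] =>
    by_cases ha : a = '`' <;> by_cases hb : b = '`' <;>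
      simp [pvTick, List.cons_prefix_cons, ha, hb]
  | a :: b :: c :: r =>
    have hr := pvTickLe r
    by_cases ha : a = '`' <;> by_cases hb : b = '`' <;> by_cases hc : c = '`' <;>
      simp [pvTickCons, List.cons_prefix_cons, ha, hb, hc, Nat.min_def] <;>
      first | omega | (intros; omega) | simp_all [eq_comm] | (intros; simp_all [eq_comm])

-- state after reading a newline-free prefix p of the current line
theorem pvReadP (p : List Char) (hp : '\n' ∉ p) (H C L T : Int) :
    p.foldl mdStep ⟨H, C, L, T, 0, 0, false, false, false⟩ =
      ⟨H, C, L, T, min p.length 3, min (pvTick p) 3,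
        PySem.Chars.startswith p ['#'],
        PySem.Chars.startswith p ['-'] || PySem.Chars.startswith p ['*'],
        PySem.Chars.isIn ['|'] p⟩ := by
  induction p using List.reverseRecOn with
  | nil =>
    have hin : PySem.Chars.isIn ['|'] ([] : List Char) = false := by
      rw [PySem.Chars.isIn_eq_false_iff]; simp
    simp [pvTick, PySem.Chars.startswith, List.isPrefixOf, hin]
  | append_singleton q c ih =>
    have hq : '\n' ∉ q := fun h => hp (List.mem_append_left _ h)
    have hc : c ≠ '\n' := fun h => hp (by simp [h])
    rw [List.foldl_append, ih hq, List.foldl_cons, List.foldl_nil]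
    rw [mdStep, if_neg hc]
    have hle := pvTickLe q
    simp only [MdState.mk.injEq]
    refine ⟨trivial, trivial, trivial, trivial, ?_, ?_, ?_, ?_, ?_⟩
    · simp only [List.length_append, List.length_singleton, Nat.min_def]
      split_ifs <;> omega
    · rw [pvTickAppend]
      by_cases hcc : c = '`' <;> by_cases hq3 : q.length < 3 <;>
        by_cases he : pvTick q = q.length <;> simp [hcc, hq3, he] <;> omega
    · rw [pvStartHash]
      by_cases h : q.length = 0
      · rw [if_pos (by omega), if_pos h]
      · rw [if_neg (by omega), if_neg h]
    · rw [pvStartHash, pvStartHash]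
      by_cases h : q.length = 0
      · rw [if_pos (by omega), if_pos h, if_pos h]
      · rw [if_neg (by omega), if_neg h, if_neg h]
    · exact (pvPipeAppend q c).symm

theorem pvLenIte (P : Prop) [Decidable P] (x : List Char) (l : List (List Char)) :
    (((if P then x :: l else l).length : Nat) : Int) = (if P then 1 else 0) + (l.length : Int) := by
  split_ifs <;> simp [add_comm]

theorem pvMdStepNewline (s : MdState) : mdStep s '\n' =
    ⟨s.h + (if s.isH then 1 else 0), s.c + (if s.ticks = 3 then 1 else 0),
     s.l + (if s.isL then 1 else 0), s.t + (if s.pipe then 1 else 0),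
     0, 0, false, false, false⟩ := by
  rw [mdStep, if_pos rfl]

theorem pvMainFold : ∀ (cs p : List Char), '\n' ∉ p → ∀ (H C L T : Int),
    mdFinish (cs.foldl mdStep (p.foldl mdStep ⟨H, C, L, T, 0, 0, false, false, false⟩)) =
      [ ("headers", H + (((pvLinesAux p.reverse cs).filter (fun line => PySem.Chars.startswith line ['#'])).length : Int)),
        ("code_blocks", C + (((pvLinesAux p.reverse cs).filter (fun line => PySem.Chars.startswith line ['`','`','`'])).length : Int)),
        ("lists", L + (((pvLinesAux p.reverse cs).filter (fun line => PySem.Chars.startswith line ['-'] || PySem.Chars.startswith line ['*'])).length : Int)),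
        ("tables", T + (((pvLinesAux p.reverse cs).filter (fun line => PySem.Chars.isIn ['|'] line)).length : Int)) ] := by
  intro cs
  induction cs with
  | nil =>
    intro p hp H C L T
    have ht := propext (pvTick3 p)
    rw [List.foldl_nil, pvReadP p hp]
    simp only [mdFinish, pvLinesAux, List.reverse_reverse, List.filter_cons, List.filter_nil, ht]
    simp [pvLenIte]
  | cons ch cs ih =>
    intro p hp H C L T
    by_cases hch : ch = '\n'
    · subst hch
      have ht := propext (pvTick3 p)
      have ihe := ih [] (by simp)
      simp only [List.foldl_nil, List.reverse_nil] at ihe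
      rw [List.foldl_cons, pvReadP p hp, pvMdStepNewline]
      simp only []
      rw [ihe]
      simp only [pvLinesAux, List.reverse_nil, List.reverse_reverse, List.filter_cons, ht]
      simp [List.filter_cons, pvLenIte, add_assoc]
    · have hp' : '\n' ∉ p ++ [ch] := by
        intro h
        rcases List.mem_append.mp h with h | h
        · exact hp h
        · simp at h; exact hch h.symm
      have e1 : pvLinesAux p.reverse (ch :: cs) = pvLinesAux ((p ++ [ch]).reverse) cs := by
        simp [pvLinesAux, hch]
      have e2 : (ch :: cs).foldl mdStep (p.foldl mdStep ⟨H, C, L, T, 0, 0, false, false, false⟩) =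
          cs.foldl mdStep ((p ++ [ch]).foldl mdStep ⟨H, C, L, T, 0, 0, false, false, false⟩) := by
        simp [List.foldl_append]
      rw [e2, e1, ih (p ++ [ch]) hp' H C L T]

-- ===== VERDICT (by name: the statement is the Claim_ definition above) =====
theorem analyze_markdown_structure_spec : Claim_equal_analyze_markdown_structure := by
  intro content _
  unfold Spec_analyze_markdown_structure
  have h := pvMainFold content.toList [] (by simp) 0 0 0 0
  simp only [List.foldl_nil, List.reverse_nil] at h
  simp only [analyze_markdown_structure, analyze_markdown_structure_alt, mdInit, pvSplitOn_eq, h]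
  norm_num
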